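-- pv_equiv track=rewrite | github.com/MrIsaar/MachineLearning | playground.py | loop
-- ===== SOURCE A (Python) =====
-- def createArray(size,zero=False,transposed = False):
--     arr = []
--     if transposed:
--         for i in range(0,size):
--             arrinner = []
--             for j in range(0,size):
--                 if zero:
--                     arrinner.append(0)
--                 else:
--                     arrinner.append(j + i+1)
--             arr.append(arrinner)
--         return arr
--     for i in range(0,size):
--         arrinner = []
--         for j in range(0,size):
--             if zero:
--                 arrinner.append(0)
--             else:
--                 arrinner.append(j + i+1)
--         arr.append(arrinner)
--     return arr
--
-- def loop(size=512):
--
--     a = createArray(size)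
--     b = createArray(size,transposed=True)
--     c = createArray(size,True)
--
--     for i in range(0,size):
--         for j in range(0,size):
--             for k in range(i,size): #i = val,k occurs val  0,1 1,2 2,3
--                 c[i][j] += a[i][k]*b[k][j]
--     return c
-- ===== SOURCE B (Python) =====
-- def loop(size=512):
--     # closed-form per-entry computation: c[i][j] = sum_{k=i}^{size-1} (i+k+1)*(k+j+1)
--     # expanded as k^2 + (i+j+2)k + (i+1)(j+1), using Gauss / sum-of-squares formulas
--     def sq(m):  # sum of t^2 for t = 0..m  (m >= -1)
--         return m * (m + 1) * (2 * m + 1) // 6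
--     def tr(m):  # sum of t for t = 0..m  (m >= -1)
--         return m * (m + 1) // 2
--     rows = []
--     for i in range(size):
--         cnt = size - i
--         s1 = tr(size - 1) - tr(i - 1)
--         s2 = sq(size - 1) - sq(i - 1)
--         rows.append([s2 + (i + j + 2) * s1 + (i + 1) * (j + 1) * cnt
--                      for j in range(size)])
--     return rows
-- ===== Notes on version B (the rewrite author's own statement) =====
-- stated objective: faster
-- what changed: Replaces the O(n^3) triple loop over materialised operand matrices with a direct O(n^2) per-entry closed form using Gauss and sum-of-squares formulas for the inner k-sum.
import Mathlib
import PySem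

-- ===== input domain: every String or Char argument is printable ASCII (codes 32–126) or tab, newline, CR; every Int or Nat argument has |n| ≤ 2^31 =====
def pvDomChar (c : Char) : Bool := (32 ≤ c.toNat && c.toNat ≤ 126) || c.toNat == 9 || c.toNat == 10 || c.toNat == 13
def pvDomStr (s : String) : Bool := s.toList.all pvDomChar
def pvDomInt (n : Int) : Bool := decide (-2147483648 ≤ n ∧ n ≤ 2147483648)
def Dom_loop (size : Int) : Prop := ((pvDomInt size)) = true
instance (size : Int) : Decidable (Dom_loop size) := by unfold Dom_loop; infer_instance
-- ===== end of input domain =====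

-- B replaces A's O(n^3) triple loop over materialised operand matrices by a direct
-- per-entry closed form (Gauss / sum-of-squares formulas for the inner k-sum): faster.


-- ===== PORT A =====
def createArray (size : Int) (zero : Bool) (transposed : Bool) : List (List Int) :=
  if transposed then
    (PySem.List.pyRange 0 size 1).foldl (fun arr i =>
      arr ++ [(PySem.List.pyRange 0 size 1).foldl (fun inner j =>
        inner ++ [if zero then 0 else j + i + 1]) []]) []
  else
    (PySem.List.pyRange 0 size 1).foldl (fun arr i =>
      arr ++ [(PySem.List.pyRange 0 size 1).foldl (fun inner j =>
        inner ++ [if zero then 0 else j + i + 1]) []]) []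

def loop (size : Int) : List (List Int) :=
  let a := createArray size false false
  let b := createArray size false true
  let c := createArray size true false
  (PySem.List.pyRange 0 size 1).foldl (fun c i =>
    (PySem.List.pyRange 0 size 1).foldl (fun c j =>
      (PySem.List.pyRange i size 1).foldl (fun c k =>
        PySem.List.pySetD c i (PySem.List.pySetD (PySem.List.pyGetD c i []) j
          (PySem.List.pyGetD (PySem.List.pyGetD c i []) j 0 +
           PySem.List.pyGetD (PySem.List.pyGetD a i []) k 0 *
           PySem.List.pyGetD (PySem.List.pyGetD b k []) j 0))) c) c) c

-- ===== PORT B =====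
-- sum of t^2 for t = 0..m  (Source B's sq)
def sqSum (m : Int) : Int := PySem.Int.floordiv (m * (m + 1) * (2 * m + 1)) 6
-- sum of t for t = 0..m  (Source B's tr)
def trSum (m : Int) : Int := PySem.Int.floordiv (m * (m + 1)) 2

def loop_alt (size : Int) : List (List Int) :=
  (PySem.List.pyRange 0 size 1).foldl (fun rows i =>
    let cnt := size - i
    let s1 := trSum (size - 1) - trSum (i - 1)
    let s2 := sqSum (size - 1) - sqSum (i - 1)
    rows ++ [(PySem.List.pyRange 0 size 1).map (fun j =>
      s2 + (i + j + 2) * s1 + (i + 1) * (j + 1) * cnt)]) []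

-- ===== PRECONDITION & SPEC =====
def Spec_loop (size : Int) (out : List (List Int)) : Prop := out = loop_alt size
instance (size : Int) (out : List (List Int)) : Decidable (Spec_loop size out) := by unfold Spec_loop; infer_instance

-- ===== CLAIM (what is proved, stated in full; the proofs are below) =====
def Claim_equal_loop : Prop := ∀ (size : Int), Dom_loop size → Spec_loop size (loop size)

-- ===== LEMMAS AND PROOFS =====

-- closed-form recurrences (the divisions are exact: ring identity + Int.add_mul_ediv_right)
lemma sqSum_succ (m : Int) : sqSum m = sqSum (m - 1) + m * m := by
  have h6 : ∀ a : Int, PySem.Int.floordiv a 6 = a / 6 :=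
    fun a => PySem.Int.floordiv_eq_ediv_of_pos (by norm_num)
  unfold sqSum
  rw [h6, h6, show m * (m + 1) * (2 * m + 1)
      = (m - 1) * (m - 1 + 1) * (2 * (m - 1) + 1) + m * m * 6 by ring,
    Int.add_mul_ediv_right _ _ (by norm_num : (6:Int) ≠ 0)]

lemma trSum_succ (m : Int) : trSum m = trSum (m - 1) + m := by
  have h2 : ∀ a : Int, PySem.Int.floordiv a 2 = a / 2 :=
    fun a => PySem.Int.floordiv_eq_ediv_of_pos (by norm_num)
  unfold trSum
  rw [h2, h2, show m * (m + 1) = (m - 1) * (m - 1 + 1) + m * 2 by ring,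
    Int.add_mul_ediv_right _ _ (by norm_num : (2:Int) ≠ 0)]

-- sum of a quadratic over a pyRange, in closed form
lemma polysum (c d : Int) (i : Int) (n : Nat) :
    ((PySem.List.pyRange i (i + n) 1).map (fun k => k * k + c * k + d)).sum
      = (sqSum (i + n - 1) - sqSum (i - 1)) + c * (trSum (i + n - 1) - trSum (i - 1)) + d * n := by
  induction n with
  | zero => simp
  | succ n ih =>
    have h1 : i + ((n : Int) + 1) = (i + n) + 1 := by ring
    have h2 : i ≤ i + (n : Int) := by omega
    push_cast
    push_cast at ih
    rw [h1, PySem.List.pyRange_one_succ_right h2, List.map_append, List.sum_append, ih]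
    simp only [List.map_cons, List.map_nil, List.sum_cons, List.sum_nil]
    rw [show i + (n:Int) + 1 - 1 = i + n by ring, sqSum_succ (i + n), trSum_succ (i + n)]
    ring

lemma polysum' (c d i b : Int) (h : i ≤ b) :
    ((PySem.List.pyRange i b 1).map (fun k => k * k + c * k + d)).sum
      = (sqSum (b - 1) - sqSum (i - 1)) + c * (trSum (b - 1) - trSum (i - 1)) + d * (b - i) := by
  obtain ⟨n, rfl⟩ : ∃ n : Nat, b = i + n := ⟨(b - i).toNat, by omega⟩
  rw [polysum]
  ring

-- the k-fold: only entry (i,j) changes, by the sum of the increments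
lemma fold_k (L : List Int) (g : Int → Int) (i j : Int)
    (hi0 : 0 ≤ i) (hj0 : 0 ≤ j) :
    ∀ (c : List (List Int)), i < (c.length : Int) → j < ((PySem.List.pyGetD c i []).length : Int) →
    L.foldl (fun c k => PySem.List.pySetD c i (PySem.List.pySetD (PySem.List.pyGetD c i []) j
        (PySem.List.pyGetD (PySem.List.pyGetD c i []) j 0 + g k))) c
      = PySem.List.pySetD c i (PySem.List.pySetD (PySem.List.pyGetD c i []) j
          (PySem.List.pyGetD (PySem.List.pyGetD c i []) j 0 + (L.map g).sum)) := by
  induction L with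
  | nil =>
    intro c hi2 hj2
    have hgc := PySem.List.pyGetD_eq_getElem c [] hi0 hi2
    have hgr := PySem.List.pyGetD_eq_getElem (PySem.List.pyGetD c i []) 0 hj0 hj2
    simp only [List.foldl_nil, List.map_nil, List.sum_nil, add_zero,
      PySem.List.pySetD_of_nonneg _ _ hi0, PySem.List.pySetD_of_nonneg _ _ hj0, hgr,
      List.set_getElem_self]
    rw [hgc, List.set_getElem_self]
  | cons k L ih =>
    intro c hi2 hj2
    have hiN : i.toNat < c.length := by omega
    have hgc := PySem.List.pyGetD_eq_getElem c [] hi0 hi2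
    have hgr := PySem.List.pyGetD_eq_getElem (PySem.List.pyGetD c i []) 0 hj0 hj2
    set row := PySem.List.pyGetD c i [] with hrow
    set v := PySem.List.pyGetD row j 0 + g k with hv
    set c' := PySem.List.pySetD c i (PySem.List.pySetD row j v) with hc'
    have hlen' : c'.length = c.length := by
      rw [hc']; exact PySem.List.length_pySetD _ _ _
    have hrow' : PySem.List.pyGetD c' i [] = PySem.List.pySetD row j v := by
      rw [hc', PySem.List.pySetD_of_nonneg _ _ hi0,
        PySem.List.pyGetD_eq_getElem _ [] hi0 (by simpa using hi2)]
      simp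
    have hrl' : (PySem.List.pyGetD c' i []).length = row.length := by
      rw [hrow']; exact PySem.List.length_pySetD _ _ _
    have hv' : PySem.List.pyGetD (PySem.List.pyGetD c' i []) j 0 = v := by
      rw [hrow', PySem.List.pyGetD_eq_getElem _ 0 hj0 (by rw [PySem.List.length_pySetD]; omega)]
      simp [PySem.List.pySetD_of_nonneg _ _ hj0]
    rw [List.foldl_cons, ih c' (by omega) (by omega)]
    rw [hv', hrow', hc']
    simp only [PySem.List.pySetD_of_nonneg _ _ hi0, PySem.List.pySetD_of_nonneg _ _ hj0,
      List.set_set]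
    rw [hv]
    congr 2
    simp [add_assoc]

-- setting one position of a pyRange-indexed map is again a pyRange-indexed map
lemma set_map_pyRange {α : Type} (n : Int) (f h : Int → α) (t : Int) (v : α)
    (h0 : 0 ≤ t) (_ht : t < n) (hv : h t = v)
    (hfh : ∀ j, 0 ≤ j → j < n → j ≠ t → f j = h j) :
    ((PySem.List.pyRange 0 n 1).map f).set t.toNat v = (PySem.List.pyRange 0 n 1).map h := by
  apply List.ext_getElem
  · simp
  · intro k hk1 hk2
    have hkn : (k : Int) < n := by
      have := hk2
      simp [PySem.List.length_pyRange_one] at this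
      omega
    rw [List.getElem_set]
    by_cases hkt : t.toNat = k
    · simp only [if_pos hkt]
      rw [List.getElem_map, PySem.List.getElem_pyRange_one]
      have : (0 : Int) + (k : Int) = t := by omega
      rw [this, hv]
    · simp only [if_neg hkt]
      simp only [List.getElem_map, PySem.List.getElem_pyRange_one]
      exact hfh _ (by omega) (by omega) (by omega)

-- the j-fold: row i gets each entry j incremented by the k-sum
lemma fold_j (size i : Int) (g : Int → Int → Int) (hi0 : 0 ≤ i) :
    ∀ (t : Nat) (c : List (List Int)), (t : Int) ≤ size → i < (c.length : Int) →
      ((PySem.List.pyGetD c i []).length : Int) = size →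
    (PySem.List.pyRange 0 t 1).foldl (fun c j =>
        (PySem.List.pyRange i size 1).foldl (fun c k =>
          PySem.List.pySetD c i (PySem.List.pySetD (PySem.List.pyGetD c i []) j
            (PySem.List.pyGetD (PySem.List.pyGetD c i []) j 0 + g j k))) c) c
      = PySem.List.pySetD c i ((PySem.List.pyRange 0 size 1).map (fun j =>
          PySem.List.pyGetD (PySem.List.pyGetD c i []) j 0 +
            (if j < (t : Int) then ((PySem.List.pyRange i size 1).map (g j)).sum else 0))) := by
  intro t
  induction t with
  | zero =>
    intro c _ hi2 hrl
    have hgc := PySem.List.pyGetD_eq_getElem c [] hi0 hi2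
    simp only [Nat.cast_zero, PySem.List.pyRange_one_eq_nil (le_refl (0:Int)), List.foldl_nil]
    have hmap : ((PySem.List.pyRange 0 size 1).map (fun j =>
        PySem.List.pyGetD (PySem.List.pyGetD c i []) j 0 +
          (if j < (0 : Int) then ((PySem.List.pyRange i size 1).map (g j)).sum else 0)))
        = (PySem.List.pyRange 0 size 1).map (fun j =>
            PySem.List.pyGetD (PySem.List.pyGetD c i []) j 0) := by
      refine List.map_congr_left fun j hj => ?_
      rw [PySem.List.mem_pyRange_one] at hj
      rw [if_neg (by omega)]
      ring
    rw [hmap, ← hrl, PySem.List.map_pyGetD_pyRange_zero',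
      PySem.List.pySetD_of_nonneg _ _ hi0, hgc, List.set_getElem_self]
  | succ t ih =>
    intro c ht hi2 hrl
    have ht' : (t : Int) ≤ size := by push_cast at ht ⊢; omega
    have htlt : (t : Int) < size := by push_cast at ht; omega
    have hiN : i.toNat < c.length := by omega
    set row := PySem.List.pyGetD c i [] with hrowdef
    set S : Int → Int := fun j => ((PySem.List.pyRange i size 1).map (g j)).sum with hS
    have hcast : ((t + 1 : Nat) : Int) = (t : Int) + 1 := by push_cast; ring
    rw [hcast, PySem.List.pyRange_one_succ_right (by positivity), List.foldl_append,
      ih c ht' hi2 hrl]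
    set ct := PySem.List.pySetD c i ((PySem.List.pyRange 0 size 1).map (fun j =>
        PySem.List.pyGetD row j 0 + (if j < (t : Int) then S j else 0))) with hct
    simp only [List.foldl_cons, List.foldl_nil]
    have hctlen : ct.length = c.length := PySem.List.length_pySetD _ _ _
    have hctrow : PySem.List.pyGetD ct i [] = ((PySem.List.pyRange 0 size 1).map (fun j =>
        PySem.List.pyGetD row j 0 + (if j < (t : Int) then S j else 0))) := by
      rw [hct, PySem.List.pySetD_of_nonneg _ _ hi0,
        PySem.List.pyGetD_eq_getElem _ [] hi0 (by simpa using hi2)]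
      simp
    have hctrl : ((PySem.List.pyGetD ct i []).length : Int) = size := by
      rw [hctrow]; simp [PySem.List.length_pyRange_one]; omega
    have hb1 : i < (ct.length : Int) := by omega
    have hb2 : (t : Int) < ((PySem.List.pyGetD ct i []).length : Int) := by
      rw [hctrl]; exact htlt
    rw [fold_k (PySem.List.pyRange i size 1) (g (t : Int)) i (t : Int) hi0 (by positivity)
      ct hb1 hb2]
    have hval : PySem.List.pyGetD (PySem.List.pyGetD ct i []) (t : Int) 0
        = PySem.List.pyGetD row (t : Int) 0 := by
      rw [hctrow, PySem.List.pyGetD_map_pyRange_of_nonneg _ _ _ _ (by positivity) htlt]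
      rw [if_neg (by omega)]; ring
    rw [hval, hctrow, hct]
    simp only [PySem.List.pySetD_of_nonneg _ _ hi0,
      PySem.List.pySetD_of_nonneg _ _ (by positivity : (0:Int) ≤ (t:Int)), List.set_set]
    congr 1
    rw [set_map_pyRange size _ _ (t : Int) _ (by positivity) htlt]
    · rw [if_pos (by omega)]
    · intro j hj0 hjn hjt
      by_cases hjlt : j < (t : Int)
      · rw [if_pos hjlt, if_pos (by omega)]
      · rw [if_neg hjlt, if_neg (by omega)]

-- the i-fold: the whole triple loop on the zero matrix, row by row
lemma fold_i (N : Nat) (G : Int → Int → Int → Int) :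
    ∀ (m : Nat), m ≤ N →
    (PySem.List.pyRange 0 m 1).foldl (fun c i =>
        (PySem.List.pyRange 0 N 1).foldl (fun c j =>
          (PySem.List.pyRange i N 1).foldl (fun c k =>
            PySem.List.pySetD c i (PySem.List.pySetD (PySem.List.pyGetD c i []) j
              (PySem.List.pyGetD (PySem.List.pyGetD c i []) j 0 + G i j k))) c) c)
      ((PySem.List.pyRange 0 N 1).map (fun _ =>
        (PySem.List.pyRange 0 N 1).map (fun _ => (0 : Int))))
      = (PySem.List.pyRange 0 N 1).map (fun i =>
          (PySem.List.pyRange 0 N 1).map (fun j =>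
            if i < (m : Int) then ((PySem.List.pyRange i N 1).map (G i j)).sum else 0)) := by
  intro m
  induction m with
  | zero =>
    intro _
    simp only [Nat.cast_zero, PySem.List.pyRange_one_eq_nil (le_refl (0:Int)), List.foldl_nil]
    refine List.map_congr_left fun i hi => List.map_congr_left fun _ _ => ?_
    rw [PySem.List.mem_pyRange_one] at hi
    rw [if_neg (by omega)]
  | succ m ih =>
    intro hm
    have hm' : m ≤ N := by omega
    have hmlt : (m : Int) < (N : Int) := by omega
    have hcast : ((m + 1 : Nat) : Int) = (m : Int) + 1 := by omega
    rw [hcast, PySem.List.pyRange_one_succ_right (by positivity), List.foldl_append, ih hm']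
    set S : Int → Int → Int := fun i j => ((PySem.List.pyRange i N 1).map (G i j)).sum with hS
    set cm := (PySem.List.pyRange 0 (N:Int) 1).map (fun i =>
        (PySem.List.pyRange 0 (N:Int) 1).map (fun j =>
          if i < (m : Int) then S i j else 0)) with hcm
    simp only [List.foldl_cons, List.foldl_nil]
    have hcmlen : ((cm.length : Int)) = (N : Int) := by
      rw [hcm]; simp [PySem.List.length_pyRange_one]
    have hcmrow : PySem.List.pyGetD cm (m : Int) [] = (PySem.List.pyRange 0 (N:Int) 1).map
        (fun j => if (m:Int) < (m : Int) then S (m:Int) j else 0) := by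
      rw [hcm, PySem.List.pyGetD_map_pyRange_of_nonneg _ _ _ _ (by positivity) hmlt]
    have hcmrl : ((PySem.List.pyGetD cm (m:Int) []).length : Int) = (N : Int) := by
      rw [hcmrow]; simp [PySem.List.length_pyRange_one]
    rw [fold_j (N : Int) (m : Int) (G (m : Int)) (by positivity) N cm (le_refl _)
      (by omega) hcmrl]
    have hnewrow : ((PySem.List.pyRange 0 (N:Int) 1).map (fun j =>
        PySem.List.pyGetD (PySem.List.pyGetD cm (m:Int) []) j 0 +
          (if j < ((N : Nat) : Int) then ((PySem.List.pyRange (m:Int) (N:Int) 1).map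
            (G (m:Int) j)).sum else 0)))
        = (PySem.List.pyRange 0 (N:Int) 1).map (fun j =>
            if (m : Int) < (m : Int) + 1 then S (m:Int) j else 0) := by
      refine List.map_congr_left fun j hj => ?_
      rw [PySem.List.mem_pyRange_one] at hj
      rw [hcmrow, PySem.List.pyGetD_map_pyRange_of_nonneg _ _ _ _ (by omega) (by omega)]
      rw [if_neg (by omega), if_pos (by omega), if_pos (by omega)]
      rw [hS]; ring
    rw [hnewrow, hcm]
    simp only [PySem.List.pySetD_of_nonneg _ _ (by positivity : (0:Int) ≤ (m:Int))]
    rw [set_map_pyRange (N : Int) _ _ (m : Int) _ (by positivity) hmlt]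
    · rfl
    · intro i hi0 hin him
      refine List.map_congr_left fun j hj => ?_
      by_cases hilt : i < (m : Int)
      · rw [if_pos hilt, if_pos (by omega)]
      · rw [if_neg hilt, if_neg (by omega)]

lemma createArray_eq (size : Int) (zero transposed : Bool) :
    createArray size zero transposed
      = (PySem.List.pyRange 0 size 1).map (fun i =>
          (PySem.List.pyRange 0 size 1).map (fun j => if zero then 0 else j + i + 1)) := by
  unfold createArray
  split_ifs <;>
  · rw [PySem.List.foldl_append_singleton_eq_map]
    simp only [List.nil_append]
    refine List.map_congr_left fun i _ => ?_
    rw [PySem.List.foldl_append_singleton_eq_map]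
    simp

lemma loop_alt_eq (size : Int) :
    loop_alt size = (PySem.List.pyRange 0 size 1).map (fun i =>
      (PySem.List.pyRange 0 size 1).map (fun j =>
        (sqSum (size - 1) - sqSum (i - 1)) + (i + j + 2) * (trSum (size - 1) - trSum (i - 1))
          + (i + 1) * (j + 1) * (size - i))) := by
  unfold loop_alt
  rw [PySem.List.foldl_append_singleton_eq_map]
  simp

-- ===== VERDICT (by name: the statement is the Claim_ definition above) =====
theorem loop_spec : Claim_equal_loop := by
  unfold Claim_equal_loop Spec_loop
  intro size _
  by_cases hs : size ≤ 0
  · simp [loop, loop_alt, createArray, PySem.List.pyRange_one_eq_nil hs]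
  · obtain ⟨N, rfl⟩ : ∃ N : Nat, size = (N : Int) := ⟨size.toNat, by omega⟩
    simp only [loop, createArray_eq]
    simp only [Bool.false_eq_true, if_false, if_true]
    rw [fold_i N _ N (le_refl N), loop_alt_eq]
    refine List.map_congr_left fun i hi => List.map_congr_left fun j hj => ?_
    rw [PySem.List.mem_pyRange_one] at hi hj
    rw [if_pos (by omega)]
    have hsum : ((PySem.List.pyRange i (N:Int) 1).map (fun k =>
        PySem.List.pyGetD (PySem.List.pyGetD ((PySem.List.pyRange 0 (N:Int) 1).map (fun i' =>
          (PySem.List.pyRange 0 (N:Int) 1).map (fun j' => j' + i' + 1))) i []) k 0 *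
        PySem.List.pyGetD (PySem.List.pyGetD ((PySem.List.pyRange 0 (N:Int) 1).map (fun i' =>
          (PySem.List.pyRange 0 (N:Int) 1).map (fun j' => j' + i' + 1))) k []) j 0))
        = (PySem.List.pyRange i (N:Int) 1).map (fun k =>
            k * k + (i + j + 2) * k + (i + 1) * (j + 1)) := by
      refine List.map_congr_left fun k hk => ?_
      rw [PySem.List.mem_pyRange_one] at hk
      rw [PySem.List.pyGetD_map_pyRange_of_nonneg _ _ _ _ (by omega) (by omega),
        PySem.List.pyGetD_map_pyRange_of_nonneg _ _ _ _ (by omega) (by omega),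
        PySem.List.pyGetD_map_pyRange_of_nonneg _ _ _ _ (by omega) (by omega),
        PySem.List.pyGetD_map_pyRange_of_nonneg _ _ _ _ (by omega) (by omega)]
      ring
    rw [hsum, polysum' (i + j + 2) ((i + 1) * (j + 1)) i (N : Int) (by omega)]
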